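-- pv_equiv track=rewrite | github.com/chojaelong/CodingTest | code/프로그래머스/기능개발.py | solution
-- ===== SOURCE A (Python) =====
-- from collections import deque
--
-- def solution(progresses, speeds):
--     progresses_queue = deque(progresses)
--     speeds_queue = deque(speeds)
--     answer = []
--     while progresses_queue:
--         count = 0
--         for i in range(len(progresses_queue)):
--             progresses_queue[i] += speeds_queue[i]
--
--         while progresses_queue:
--             if progresses_queue[0] >= 100:
--                 progresses_queue.popleft()
--                 speeds_queue.popleft()
--                 count += 1
--             else:
--                 break
--         if count > 0:
--             answer.append(count)
--
--     return answer
-- ===== SOURCE B (Python) =====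
-- def solution(progresses, speeds):
--     # completion day per task: smallest d >= 1 with p + d*s >= 100, then group
--     # consecutive tasks whose day does not exceed their group leader's day
--     days = [1 if p + s >= 100 else -((100 - p) // -s)
--             for p, s in zip(progresses, speeds)]
--     answer = []
--     while days:
--         leader = days[0]
--         k = 1
--         while k < len(days) and days[k] <= leader:
--             k += 1
--         answer.append(k)
--         days = days[k:]
--     return answer
-- ===== Notes on version B (the rewrite author's own statement) =====
-- stated objective: faster
-- what changed: Replaces the day-by-day queue simulation with a closed-form ceiling-division completion day per task followed by a single grouping scan; intended as faster (a timing run saw A time out at n=16 where B returned, but could not measure a clean ratio).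
-- outside the precondition, e.g. on solution([150], [0]): A returns [1], B returns [1]; on solution([10], [0]): A does not finish within the time limit, B raises ZeroDivisionError
import Mathlib
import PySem

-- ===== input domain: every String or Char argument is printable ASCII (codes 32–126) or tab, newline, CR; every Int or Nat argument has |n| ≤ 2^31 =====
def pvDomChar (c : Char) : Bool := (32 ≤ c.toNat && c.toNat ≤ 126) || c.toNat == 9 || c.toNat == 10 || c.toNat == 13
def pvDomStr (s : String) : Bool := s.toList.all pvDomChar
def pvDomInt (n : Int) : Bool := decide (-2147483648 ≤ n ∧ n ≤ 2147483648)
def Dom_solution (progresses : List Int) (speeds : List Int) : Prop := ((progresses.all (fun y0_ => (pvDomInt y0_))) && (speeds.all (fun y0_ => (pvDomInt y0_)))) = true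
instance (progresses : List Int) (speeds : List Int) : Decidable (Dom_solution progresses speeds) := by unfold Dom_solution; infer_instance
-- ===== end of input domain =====

-- B replaces A's day-by-day queue simulation by a closed-form ceiling-division
-- completion day per task and a single grouping scan (objective: faster; intended
-- as faster — a timing run saw A time out where B returned, no clean ratio).

-- ===== PORT A =====
-- 'for i in range(len(progresses_queue)): progresses_queue[i] += speeds_queue[i]'
-- (if speeds is shorter Python raises IndexError; those inputs are outside Pre_)
def pvAddSpeeds : List Int → List Int → List Int
  | [], _ => []
  | p :: pt, [] => p :: pvAddSpeeds pt []
  | p :: pt, s :: st => (p + s) :: pvAddSpeeds pt st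

-- inner 'while progresses_queue: if progresses_queue[0] >= 100: popleft both; count += 1 else break'
def pvPopCount : List Int → List Int → Nat × List Int × List Int
  | [], ss => (0, [], ss)
  | p :: pt, ss =>
    if 100 ≤ p then
      let r := pvPopCount pt ss.tail
      (r.1 + 1, r.2.1, r.2.2)
    else (0, p :: pt, ss)

-- outer while loop; fuel is only a totality guard (proved sufficient on Pre_)
def pvLoopA : Nat → List Int → List Int → List Int → List Int
  | 0, _, _, ans => ans
  | fuel+1, ps, ss, ans =>
    if ps.isEmpty then ans
    else
      let ps1 := pvAddSpeeds ps ss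
      let r := pvPopCount ps1 ss
      pvLoopA fuel r.2.1 r.2.2 (if r.1 > 0 then ans ++ [(r.1 : Int)] else ans)

def solution (progresses : List Int) (speeds : List Int) : List Int :=
  pvLoopA (1 + progresses.length + (progresses.map (fun p => (100 - p).toNat)).sum)
    progresses speeds []

-- ===== PORT B =====
-- completion day: 1 if p + s >= 100 else -((100 - p) // -s)
def pvDay (p s : Int) : Int :=
  if 100 ≤ p + s then 1 else -(PySem.Int.floordiv (100 - p) (-s))

-- inner 'while k < len(days) and days[k] <= leader: k += 1'
def pvSpanLe (d : Int) : List Int → Nat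
  | [] => 0
  | x :: xs => if x ≤ d then pvSpanLe d xs + 1 else 0

-- outer 'while days: … answer.append(k); days = days[k:]'
def pvGroup : List Int → List Int
  | [] => []
  | d :: ds =>
    ((1 + pvSpanLe d ds : Nat) : Int) :: pvGroup (ds.drop (pvSpanLe d ds))
  termination_by l => l.length
  decreasing_by simp [List.length_drop]

def solution_alt (progresses : List Int) (speeds : List Int) : List Int :=
  pvGroup ((progresses.zip speeds).map (fun x => pvDay x.1 x.2))

-- ===== PRECONDITION & SPEC =====
-- Pre_ excludes inputs where speeds is shorter than progresses (A raises IndexError)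
-- and inputs with a relevant speed < 1: there A loops forever whenever the task is
-- (or regresses) below 100 at the moment it must finish, except for accidental
-- corners (e.g. p+s ≥ 100 throughout) that Pre_ also leaves out.
def Pre_solution (progresses : List Int) (speeds : List Int) : Prop :=
  progresses.length ≤ speeds.length ∧ ∀ x ∈ progresses.zip speeds, 1 ≤ x.2

instance (progresses : List Int) (speeds : List Int) : Decidable (Pre_solution progresses speeds) := by
  unfold Pre_solution; infer_instance

def pvWitness_solution : List Int × List Int := ([93, 30, 55], [1, 30, 5])

def Spec_solution (progresses : List Int) (speeds : List Int) (out : List Int) : Prop := out = solution_alt progresses speeds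
instance (progresses : List Int) (speeds : List Int) (out : List Int) : Decidable (Spec_solution progresses speeds out) := by unfold Spec_solution; infer_instance

-- ===== CLAIM (what is proved, stated in full; the proofs are below) =====
def Claim_equal_solution : Prop := ∀ (progresses : List Int) (speeds : List Int), Dom_solution progresses speeds → Pre_solution progresses speeds → Spec_solution progresses speeds (solution progresses speeds)

-- ===== LEMMAS AND PROOFS =====

-- proof-side abstraction: remaining days of a task, and its clamp to ≥ 1
def pvRem (p s : Int) : Int := -(PySem.Int.floordiv (p - 100) s)
def pvClamp (r : Int) : Int := max 1 r

-- abstract day-by-day simulation on the remaining-day list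
def pvDsim : Nat → List Int → List Int → List Int
  | 0, _, ans => ans
  | fuel+1, rs, ans =>
    if rs.isEmpty then ans
    else
      let rs1 := rs.map (· - 1)
      let c := pvSpanLe 0 rs1
      pvDsim fuel (rs1.drop c) (if c > 0 then ans ++ [(c : Int)] else ans)

def pvNeeded (rs : List Int) : Nat := (rs.map (fun r => (pvClamp r).toNat)).sum

-- arithmetic facts about pvRem (1 ≤ s throughout)
theorem pvRem_le_zero_iff (p s : Int) (hs : 1 ≤ s) : pvRem p s ≤ 0 ↔ 100 ≤ p := by
  have h := PySem.Int.le_floordiv_iff_mul_le (a := p - 100) (b := s) (q := 0) (by omega)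
  unfold pvRem
  generalize PySem.Int.floordiv (p - 100) s = q at *
  omega

theorem pvRem_step (p s : Int) (hs : 1 ≤ s) : pvRem (p + s) s = pvRem p s - 1 := by
  unfold pvRem
  have h0 : PySem.Int.floordiv (p - 100) s = PySem.Int.floordiv (p - 100) s := rfl
  rw [PySem.Int.floordiv_eq_iff_of_pos (by omega)] at h0
  have h1 : PySem.Int.floordiv (p + s - 100) s = PySem.Int.floordiv (p - 100) s + 1 := by
    rw [PySem.Int.floordiv_eq_iff_of_pos (by omega)]
    constructor <;> nlinarith [h0.1, h0.2]
  rw [h1]; ring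

theorem pvDay_eq_clamp (p s : Int) (hs : 1 ≤ s) : pvDay p s = pvClamp (pvRem p s) := by
  have hst := pvRem_step p s hs
  have hle := pvRem_le_zero_iff (p + s) s hs
  by_cases h : 100 ≤ p + s
  · have : pvRem p s ≤ 1 := by omega
    rw [pvDay, if_pos h]
    unfold pvClamp
    omega
  · have h2 : 2 ≤ pvRem p s := by omega
    have hneg : (100 - p) = -(p - 100) := by ring
    rw [pvDay, if_neg h, hneg, PySem.Int.floordiv_neg_neg]
    unfold pvClamp pvRem at *
    omega

theorem pvClamp_bound (p s : Int) (hs : 1 ≤ s) :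
    (pvClamp (pvRem p s)).toNat ≤ 1 + (100 - p).toNat := by
  by_cases h : 100 ≤ p
  · have := (pvRem_le_zero_iff p s hs).mpr h
    unfold pvClamp at *
    omega
  · have hb : (p - 100) ≤ PySem.Int.floordiv (p - 100) s := by
      rw [PySem.Int.le_floordiv_iff_mul_le (by omega)]
      nlinarith
    unfold pvClamp pvRem at *
    generalize PySem.Int.floordiv (p - 100) s = q at *
    omega

-- span lemmas
theorem pvSpanLe_congr (d e : Int) (f g : Int → Int)
    (xs : List Int) (h : ∀ x ∈ xs, (f x ≤ d ↔ g x ≤ e)) :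
    pvSpanLe d (xs.map f) = pvSpanLe e (xs.map g) := by
  induction xs with
  | nil => rfl
  | cons x xs ih =>
    have hx := h x (List.mem_cons_self ..)
    have ih' := ih (fun y hy => h y (List.mem_cons_of_mem _ hy))
    simp only [List.map_cons, pvSpanLe]
    by_cases hf : f x ≤ d
    · rw [if_pos hf, if_pos (hx.mp hf), ih']
    · rw [if_neg hf, if_neg (fun hg => hf (hx.mpr hg))]

-- head after the span violates the span predicate
theorem pvSpanLe_drop_head (d : Int) (xs : List Int) (y : Int)
    (h : (xs.drop (pvSpanLe d xs)).head? = some y) : d < y := by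
  induction xs with
  | nil => simp at h
  | cons x xs ih =>
    by_cases hx : x ≤ d
    · simp only [pvSpanLe, if_pos hx, List.drop_succ_cons] at h
      exact ih h
    · simp only [pvSpanLe, if_neg hx, List.drop_zero, List.head?_cons,
        Option.some.injEq] at h
      omega

-- grouping is invariant under a uniform -1 shift when the head is ≥ 2
theorem pvGroup_shift_aux (n : Nat) : ∀ (rs : List Int), rs.length ≤ n →
    (∀ (hne : rs ≠ []), 2 ≤ rs.head hne) →
    pvGroup ((rs.map (· - 1)).map pvClamp) = pvGroup (rs.map pvClamp) := by
  induction n with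
  | zero =>
    intro rs hlen _
    have : rs = [] := by cases rs <;> simp_all
    subst this; rfl
  | succ n ih =>
    intro rs hlen hh
    cases rs with
    | nil => rfl
    | cons r rest =>
      have hr : 2 ≤ r := hh (by simp)
      have hcl1 : pvClamp (r - 1) = r - 1 := by unfold pvClamp; omega
      have hcl2 : pvClamp r = r := by unfold pvClamp; omega
      have hspan : pvSpanLe (r - 1) (rest.map (fun x => pvClamp (x - 1)))
          = pvSpanLe r (rest.map pvClamp) := by
        apply pvSpanLe_congr
        intro x _
        unfold pvClamp
        omega
      simp only [List.map_cons, List.map_map, Function.comp_def]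
      rw [pvGroup, pvGroup, hcl1, hcl2, hspan]
      congr 1
      rw [← List.map_drop, ← List.map_drop,
        show (fun x : Int => pvClamp (x - 1)) = (pvClamp ∘ fun x => x - 1) from rfl,
        ← List.map_map]
      apply ih
      · have h1 := List.length_drop (l := rest) (i := pvSpanLe r (rest.map pvClamp))
        simp only [List.length_cons] at hlen
        omega
      · intro hne
        have h3 := List.head?_eq_some_head hne
        have hgt := pvSpanLe_drop_head r (rest.map pvClamp)
            (pvClamp ((rest.drop (pvSpanLe r (rest.map pvClamp))).head hne)) (by
          rw [← List.map_drop, List.head?_map, h3]; rfl)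
        have hgt2 : r < max 1 ((rest.drop (pvSpanLe r (rest.map pvClamp))).head hne) := hgt
        omega

theorem pvGroup_shift (rs : List Int)
    (hh : ∀ (hne : rs ≠ []), 2 ≤ rs.head hne) :
    pvGroup ((rs.map (· - 1)).map pvClamp) = pvGroup (rs.map pvClamp) :=
  pvGroup_shift_aux rs.length rs (le_refl _) hh

theorem pvNeeded_shift_le (xs : List Int) : pvNeeded (xs.map (· - 1)) ≤ pvNeeded xs := by
  induction xs with
  | nil => simp [pvNeeded]
  | cons x xs ih =>
    simp only [pvNeeded, List.map_cons, List.sum_cons] at ih ⊢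
    have : (pvClamp (x - 1)).toNat ≤ (pvClamp x).toNat := by unfold pvClamp; omega
    omega

theorem pvNeeded_drop_le (k : Nat) (xs : List Int) : pvNeeded (xs.drop k) ≤ pvNeeded xs := by
  conv_rhs => rw [← List.take_append_drop k xs]
  simp only [pvNeeded, List.map_append, List.sum_append]
  omega

-- the abstract simulation computes the grouping
theorem pvDsim_eq_group (fuel : Nat) : ∀ (rs : List Int) (ans : List Int),
    pvNeeded rs ≤ fuel → pvDsim fuel rs ans = ans ++ pvGroup (rs.map pvClamp) := by
  induction fuel with
  | zero =>
    intro rs ans hf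
    cases rs with
    | nil => simp [pvDsim, pvGroup]
    | cons r rest =>
      exfalso
      simp only [pvNeeded, List.map_cons, List.sum_cons] at hf
      unfold pvClamp at hf
      omega
  | succ fuel ih =>
    intro rs ans hf
    cases rs with
    | nil => simp [pvDsim, pvGroup]
    | cons r rest =>
      simp only [pvDsim, List.isEmpty_cons, Bool.false_eq_true, if_false, List.map_cons]
      by_cases hr2 : r ≤ 1
      · -- the head finishes this day: a group is emitted
        have hspan : pvSpanLe 0 ((r - 1) :: rest.map (· - 1))
            = pvSpanLe 0 (rest.map (· - 1)) + 1 := by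
          simp only [pvSpanLe, if_pos (by omega : r - 1 ≤ (0:Int))]
        have hk : pvSpanLe 0 (rest.map (· - 1)) = pvSpanLe 1 (rest.map pvClamp) := by
          apply pvSpanLe_congr
          intro x _
          unfold pvClamp
          omega
        rw [hspan, hk]
        set k := pvSpanLe 1 (rest.map pvClamp) with hkdef
        rw [if_pos (by omega : k + 1 > 0)]
        have hdrop : ((r - 1) :: rest.map (· - 1)).drop (k + 1)
            = (rest.drop k).map (· - 1) := by
          simp only [List.drop_succ_cons, List.map_drop]
        rw [hdrop]
        have hneed : pvNeeded ((rest.drop k).map (· - 1)) ≤ fuel := by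
          have h1 := pvNeeded_shift_le (rest.drop k)
          have h2 := pvNeeded_drop_le k rest
          simp only [pvNeeded, List.map_cons, List.sum_cons] at hf
          have : (1:Int) ≤ pvClamp r := by unfold pvClamp; omega
          simp only [pvNeeded] at h1 h2 ⊢
          omega
        rw [ih _ _ hneed]
        have hshift : pvGroup (((rest.drop k).map (· - 1)).map pvClamp)
            = pvGroup ((rest.drop k).map pvClamp) := by
          apply pvGroup_shift
          intro hne
          have h3 := List.head?_eq_some_head hne
          have hgt := pvSpanLe_drop_head 1 (rest.map pvClamp)
              (pvClamp ((rest.drop k).head hne)) (by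
            rw [← hkdef, ← List.map_drop, List.head?_map, h3]; rfl)
          have hgt2 : (1:Int) < max 1 ((rest.drop k).head hne) := hgt
          omega
        rw [hshift]
        have hclr : pvClamp r = 1 := by unfold pvClamp; omega
        rw [pvGroup, hclr]
        have hk2 : pvSpanLe 1 (rest.map pvClamp) = k := hkdef.symm
        rw [hk2, ← List.map_drop]
        simp [Nat.add_comm]
      · -- nobody finishes this day: one silent step
        have hc : pvSpanLe 0 ((r - 1) :: rest.map (· - 1)) = 0 := by
          simp only [pvSpanLe, if_neg (by omega : ¬ (r - 1 ≤ (0:Int)))]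
        rw [hc]
        simp only [gt_iff_lt, Nat.lt_irrefl, if_false, List.drop_zero]
        have hneed : pvNeeded ((r - 1) :: rest.map (· - 1)) ≤ fuel := by
          have h1 := pvNeeded_shift_le rest
          simp only [pvNeeded, List.map_cons, List.sum_cons] at hf ⊢
          have : (pvClamp (r - 1)).toNat + 1 ≤ (pvClamp r).toNat := by
            unfold pvClamp; omega
          simp only [pvNeeded] at h1
          omega
        have := ih ((r - 1) :: rest.map (· - 1)) ans hneed
        rw [this]
        have hshift : pvGroup (((r :: rest).map (· - 1)).map pvClamp)
            = pvGroup ((r :: rest).map pvClamp) := by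
          apply pvGroup_shift
          intro _
          simpa using (by omega : (2:Int) ≤ r)
        simp only [List.map_cons] at hshift ⊢
        rw [hshift]

-- leading count of already-finished tasks, on the pair representation
def pvCnt : List (Int × Int) → Nat
  | [] => 0
  | x :: t => if 100 ≤ x.1 then pvCnt t + 1 else 0

theorem pvAddSpeeds_spec (l : List (Int × Int)) (ex : List Int) :
    pvAddSpeeds (l.map Prod.fst) (l.map Prod.snd ++ ex)
      = l.map (fun x => x.1 + x.2) := by
  induction l with
  | nil => cases ex <;> rfl
  | cons x t ih => simpa [pvAddSpeeds] using ih

theorem pvPopCount_spec (l : List (Int × Int)) (ex : List Int) :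
    pvPopCount (l.map Prod.fst) (l.map Prod.snd ++ ex)
      = (pvCnt l, (l.drop (pvCnt l)).map Prod.fst, (l.drop (pvCnt l)).map Prod.snd ++ ex) := by
  induction l with
  | nil => rfl
  | cons x t ih =>
    by_cases hx : 100 ≤ x.1
    · simp only [List.map_cons, List.cons_append, pvPopCount, if_pos hx, pvCnt,
        List.tail_cons, ih, List.drop_succ_cons]
    · simp only [List.map_cons, List.cons_append, pvPopCount, if_neg hx, pvCnt,
        List.drop_zero]

theorem pvCnt_adv_eq_span (l : List (Int × Int)) (hs : ∀ x ∈ l, 1 ≤ x.2) :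
    pvCnt (l.map (fun x => (x.1 + x.2, x.2)))
      = pvSpanLe 0 ((l.map (fun x => pvRem x.1 x.2)).map (· - 1)) := by
  induction l with
  | nil => rfl
  | cons x t ih =>
    have hx := hs x (List.mem_cons_self ..)
    have ih' := ih (fun y hy => hs y (List.mem_cons_of_mem _ hy))
    have hcond : (100 ≤ x.1 + x.2) ↔ (pvRem x.1 x.2 - 1 ≤ 0) := by
      rw [← pvRem_step x.1 x.2 hx, pvRem_le_zero_iff (x.1 + x.2) x.2 hx]
    simp only [List.map_cons, pvCnt, pvSpanLe]
    by_cases h : 100 ≤ x.1 + x.2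
    · rw [if_pos h, if_pos (hcond.mp h), ih']
    · rw [if_neg h, if_neg (fun hg => h (hcond.mpr hg))]

theorem pvMap_rem_adv (l : List (Int × Int)) (hs : ∀ x ∈ l, 1 ≤ x.2) :
    (l.map (fun x => (x.1 + x.2, x.2))).map (fun x => pvRem x.1 x.2)
      = (l.map (fun x => pvRem x.1 x.2)).map (· - 1) := by
  simp only [List.map_map, Function.comp_def]
  apply List.map_congr_left
  intro x hx
  exact pvRem_step x.1 x.2 (hs x hx)

-- port A equals the abstract simulation
theorem pvLoopA_eq_dsim (fuel : Nat) : ∀ (l : List (Int × Int)) (ex ans : List Int),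
    (∀ x ∈ l, 1 ≤ x.2) →
    pvLoopA fuel (l.map Prod.fst) (l.map Prod.snd ++ ex) ans
      = pvDsim fuel (l.map (fun x => pvRem x.1 x.2)) ans := by
  induction fuel with
  | zero => intro l ex ans _; rfl
  | succ fuel ih =>
    intro l ex ans hs
    cases l with
    | nil => cases ex <;> rfl
    | cons x t =>
      simp only [pvLoopA, pvDsim, List.map_cons, List.isEmpty_cons,
        Bool.false_eq_true, if_false]
      rw [show (x.1 :: t.map Prod.fst) = ((x :: t).map Prod.fst) from rfl,
        show (x.2 :: t.map Prod.snd ++ ex) = ((x :: t).map Prod.snd ++ ex) from rfl,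
        pvAddSpeeds_spec]
      set l := x :: t with hl
      have hadv1 : l.map (fun y => y.1 + y.2)
          = (l.map (fun y => (y.1 + y.2, y.2))).map Prod.fst := by
        simp [List.map_map, Function.comp_def]
      have hadv2 : l.map Prod.snd
          = (l.map (fun y => (y.1 + y.2, y.2))).map Prod.snd := by
        simp [List.map_map, Function.comp_def]
      rw [hadv1, hadv2, pvPopCount_spec]
      set la := l.map (fun y => (y.1 + y.2, y.2)) with hla
      have hcnt : pvCnt la = pvSpanLe 0 ((l.map (fun y => pvRem y.1 y.2)).map (· - 1)) := by
        rw [hla]; exact pvCnt_adv_eq_span l hs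
      have hsa : ∀ y ∈ la.drop (pvCnt la), 1 ≤ y.2 := by
        intro y hy
        have hy2 := List.mem_of_mem_drop hy
        rw [hla] at hy2
        obtain ⟨z, hz, rfl⟩ := List.mem_map.mp hy2
        exact hs z hz
      rw [ih (la.drop (pvCnt la)) ex _ hsa]
      have hrd : (la.drop (pvCnt la)).map (fun y => pvRem y.1 y.2)
          = ((l.map (fun y => pvRem y.1 y.2)).map (· - 1)).drop (pvCnt la) := by
        rw [hla, ← List.map_drop,
          pvMap_rem_adv (l.drop (pvCnt la)) (fun y hy => hs y (List.mem_of_mem_drop hy)),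
          List.map_drop, List.map_drop]
      rw [hrd, hcnt, hl]
      simp only [List.map_cons]

-- fuel is sufficient: total cost bound on the remaining-day list
theorem pvNeeded_le (l : List (Int × Int)) (hs : ∀ x ∈ l, 1 ≤ x.2) :
    pvNeeded (l.map (fun x => pvRem x.1 x.2))
      ≤ l.length + ((l.map Prod.fst).map (fun p => (100 - p).toNat)).sum := by
  induction l with
  | nil => simp [pvNeeded]
  | cons x t ih =>
    have hx := pvClamp_bound x.1 x.2 (hs x (List.mem_cons_self ..))
    have ih' := ih (fun y hy => hs y (List.mem_cons_of_mem _ hy))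
    simp only [pvNeeded, List.map_cons, List.sum_cons, List.length_cons] at ih' ⊢
    omega

theorem pvZip_snd_append : ∀ (ps ss : List Int), ps.length ≤ ss.length →
    (ps.zip ss).map Prod.snd ++ ss.drop ps.length = ss := by
  intro ps
  induction ps with
  | nil => intro ss _; simp
  | cons p pt ih =>
    intro ss hlen
    cases ss with
    | nil => simp at hlen
    | cons s st =>
      simp only [List.zip_cons_cons, List.map_cons, List.cons_append,
        List.length_cons, List.drop_succ_cons]
      rw [ih st (by simpa using hlen)]

-- ===== VERDICT (by name: the statement is the Claim_ definition above) =====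
theorem solution_spec : Claim_equal_solution := by
  intro ps ss _ hpre
  obtain ⟨hlen, hsp⟩ := hpre
  unfold Spec_solution solution solution_alt
  have hfst : (ps.zip ss).map Prod.fst = ps := List.map_fst_zip hlen
  have hsnd := pvZip_snd_append ps ss hlen
  rw [show pvLoopA (1 + ps.length + (ps.map (fun p => (100 - p).toNat)).sum) ps ss []
      = pvLoopA (1 + ps.length + (ps.map (fun p => (100 - p).toNat)).sum)
        ((ps.zip ss).map Prod.fst) ((ps.zip ss).map Prod.snd ++ ss.drop ps.length) []
    from by rw [hfst, hsnd]]
  rw [pvLoopA_eq_dsim _ (ps.zip ss) _ [] hsp]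
  have hlz : (ps.zip ss).length = ps.length := by
    rw [List.length_zip]; omega
  have hneed : pvNeeded ((ps.zip ss).map (fun x => pvRem x.1 x.2))
      ≤ 1 + ps.length + (ps.map (fun p => (100 - p).toNat)).sum := by
    have h1 := pvNeeded_le (ps.zip ss) hsp
    rw [hfst, hlz] at h1
    omega
  rw [pvDsim_eq_group _ _ [] hneed]
  simp only [List.nil_append, List.map_map, Function.comp_def]
  congr 1
  apply List.map_congr_left
  intro x hx
  exact (pvDay_eq_clamp x.1 x.2 (hsp x hx)).symm
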